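-- pv_equiv track=rewrite | github.com/LucianoWil/Ejs-TDA | Ej 11 entregado.py | obtener_optimos
-- ===== SOURCE A (Python) =====
-- def obtener_optimos(k):
--     optimos = []
--
--     for i in range(k + 1):
--         if i == 0:
--             optimos.append(0)
--         elif i%2 == 0:
--             optimos.append(min(optimos[i-1]+1, optimos[int(i/2)]+1))
--         else:
--             optimos.append(optimos[i-1]+1)
--
--     return optimos
-- ===== SOURCE B (Python) =====
-- def obtener_optimos(k):
--     # Closed form: optimal step count for i is floor(log2 i) + popcount(i); no DP table needed.
--     return [0 if i == 0 else i.bit_length() - 1 + bin(i).count("1") for i in range(k + 1)]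
-- ===== Notes on version B (the rewrite author's own statement) =====
-- stated objective: simpler
-- what changed: Replaces the DP recurrence over a growing table (each entry read back via optimos[i-1] and optimos[i//2]) with an independent closed form per index, floor(log2 i) + popcount(i), as a single list comprehension.
import Mathlib
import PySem

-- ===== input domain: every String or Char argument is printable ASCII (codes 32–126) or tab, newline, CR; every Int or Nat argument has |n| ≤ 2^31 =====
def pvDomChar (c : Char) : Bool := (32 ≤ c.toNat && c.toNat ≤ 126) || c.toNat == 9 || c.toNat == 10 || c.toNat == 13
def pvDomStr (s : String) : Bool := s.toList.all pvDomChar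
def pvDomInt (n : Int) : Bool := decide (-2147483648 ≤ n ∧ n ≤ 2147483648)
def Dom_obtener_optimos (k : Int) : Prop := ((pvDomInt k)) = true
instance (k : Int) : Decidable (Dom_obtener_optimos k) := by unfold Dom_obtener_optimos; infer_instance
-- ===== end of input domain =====

-- B replaces A's DP table with an independent closed form per index (floor(log2 i) + popcount(i)); objective: simpler.

-- ===== PORT A =====
-- the list accesses optimos[i-1] and optimos[int(i/2)] are always in range (0 ≤ index < length),
-- so Python never raises; pyGetD with default 0 is exact here.
def obtener_optimos (k : Int) : List Int :=
  (PySem.List.pyRange 0 (k + 1) 1).foldl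
    (fun optimos i =>
      if i = 0 then
        optimos ++ [0]
      else if PySem.Int.mod i 2 = 0 then
        optimos ++ [min (PySem.List.pyGetD optimos (i - 1) 0 + 1)
                        (PySem.List.pyGetD optimos (PySem.Int.truncdiv i 2) 0 + 1)]
      else
        optimos ++ [PySem.List.pyGetD optimos (i - 1) 0 + 1])
    []

-- ===== PORT B =====
def obtener_optimos_alt (k : Int) : List Int :=
  (PySem.List.pyRange 0 (k + 1) 1).map
    (fun i => if i = 0 then 0
              else (PySem.Int.bitLength i : Int) - 1 + (PySem.Int.bitCount i : Int))

-- ===== PRECONDITION & SPEC =====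
def Spec_obtener_optimos (k : Int) (out : List Int) : Prop := out = obtener_optimos_alt k
instance (k : Int) (out : List Int) : Decidable (Spec_obtener_optimos k out) := by unfold Spec_obtener_optimos; infer_instance

-- ===== CLAIM (what is proved, stated in full; the proofs are below) =====
def Claim_equal_obtener_optimos : Prop := ∀ (k : Int), Dom_obtener_optimos k → Spec_obtener_optimos k (obtener_optimos k)

-- ===== LEMMAS AND PROOFS =====

-- the closed form as a function of a natural number
def pvF (m : Nat) : Int :=
  if (m : Int) = 0 then 0
  else (PySem.Int.bitLength (m : Int) : Int) - 1 + (PySem.Int.bitCount (m : Int) : Int)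

lemma pvF_odd (m : Nat) : pvF (2 * m + 1) = pvF (2 * m) + 1 := by
  rcases Nat.eq_zero_or_pos m with h | h
  · subst h; decide
  · unfold pvF
    rw [if_neg (by positivity), if_neg (by positivity)]
    rw [PySem.Int.bitLength_natCast (by omega), PySem.Int.bitCount_natCast (by omega),
        PySem.Int.bitLength_natCast (m := 2 * m) (by omega),
        PySem.Int.bitCount_natCast (m := 2 * m) (by omega)]
    have h1 : (2 * m + 1) / 2 = m := by omega
    have h2 : (2 * m) / 2 = m := by omega
    rw [h1, h2]
    have h3 : (2 * m + 1) % 2 = 1 := by omega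
    have h4 : (2 * m) % 2 = 0 := by omega
    rw [h3, h4]
    push_cast
    ring

lemma pvF_even (m : Nat) (hm : 0 < m) : pvF (2 * m) = pvF m + 1 := by
  unfold pvF
  rw [if_neg (by positivity), if_neg (Int.natCast_ne_zero.mpr (by omega))]
  rw [PySem.Int.bitLength_natCast (m := 2 * m) (by omega),
      PySem.Int.bitCount_natCast (m := 2 * m) (by omega)]
  have h2 : (2 * m) / 2 = m := by omega
  have h4 : (2 * m) % 2 = 0 := by omega
  rw [h2, h4]
  push_cast
  ring

-- one DP step never helps by more than 1: pvF m ≤ pvF (m-1) + 1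
lemma pvF_step : ∀ m : Nat, 0 < m → pvF m ≤ pvF (m - 1) + 1 := by
  intro m
  induction m using Nat.strong_induction_on with
  | _ m ih =>
    intro hm
    rcases Nat.even_or_odd m with ⟨t, ht⟩ | ⟨t, ht⟩
    · -- m = 2t, t ≥ 1
      have ht' : m = 2 * t := by omega
      subst ht'
      have htpos : 0 < t := by omega
      rcases Nat.lt_or_ge t 2 with h2 | h2
      · interval_cases t
        · decide
      · have e1 : 2 * t - 1 = 2 * (t - 1) + 1 := by omega
        rw [pvF_even t htpos, e1, pvF_odd (t - 1), pvF_even (t - 1) (by omega)]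
        have := ih t (by omega) htpos
        omega
    · -- m = 2t + 1
      have ht' : m = 2 * t + 1 := by omega
      subst ht'
      rw [show 2 * t + 1 - 1 = 2 * t from rfl, pvF_odd t]

-- the key DP-recurrence identity for even indices
lemma pvF_min (t : Nat) (ht : 0 < t) :
    min (pvF (2 * t - 1) + 1) (pvF t + 1) = pvF (2 * t) := by
  have h := pvF_step (2 * t) (by omega)
  rw [pvF_even t ht] at h ⊢
  apply min_eq_right
  omega

-- evaluating A's fold step on the table map pvF (range m) at index m
lemma pv_step_eval (m : Nat) :
    (fun (optimos : List Int) (i : Int) =>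
      if i = 0 then optimos ++ [0]
      else if PySem.Int.mod i 2 = 0 then
        optimos ++ [min (PySem.List.pyGetD optimos (i - 1) 0 + 1)
                        (PySem.List.pyGetD optimos (PySem.Int.truncdiv i 2) 0 + 1)]
      else optimos ++ [PySem.List.pyGetD optimos (i - 1) 0 + 1])
      ((List.range m).map pvF) (m : Int)
    = (List.range (m + 1)).map pvF := by
  rw [List.range_succ, List.map_append]
  rcases Nat.eq_zero_or_pos m with h0 | h0
  · subst h0; decide
  · simp only
    rw [if_neg (Int.natCast_ne_zero.mpr (by omega))]
    have hget : ∀ (j : Nat), j < m →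
        PySem.List.pyGetD ((List.range m).map pvF) ((j : Nat) : Int) 0 = pvF j := by
      intro j hj
      rw [PySem.List.pyGetD_natCast, PySem.List.getD_map_range _ _ _ _ hj]
    rcases Nat.even_or_odd m with ⟨t, htm⟩ | ⟨t, htm⟩
    · -- m even, m = 2t with t ≥ 1
      have hm2 : m = 2 * t := by omega
      have hmod : PySem.Int.mod (m : Int) 2 = 0 := by
        rw [show (2 : Int) = ((2 : Nat) : Int) from rfl, PySem.Int.mod_natCast]
        omega
      rw [if_pos hmod]
      have htd : PySem.Int.truncdiv (m : Int) 2 = ((t : Nat) : Int) := by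
        simp [PySem.Int.truncdiv]
        omega
      have hsub : ((m : Nat) : Int) - 1 = (((m - 1 : Nat)) : Int) := by omega
      rw [htd, hsub, hget (m - 1) (by omega), hget t (by omega), hm2,
          List.map_singleton, ← pvF_min t (by omega)]
    · -- m odd, m = 2t + 1
      have hm2 : m = 2 * t + 1 := by omega
      have hmod : ¬ PySem.Int.mod (m : Int) 2 = 0 := by
        rw [show (2 : Int) = ((2 : Nat) : Int) from rfl, PySem.Int.mod_natCast]
        omega
      rw [if_neg hmod]
      have hsub : ((m : Nat) : Int) - 1 = (((m - 1 : Nat)) : Int) := by omega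
      rw [hsub, hget (m - 1) (by omega), hm2, List.map_singleton,
          show 2 * t + 1 - 1 = 2 * t from rfl, pvF_odd t]

-- A's fold over range(0, n) builds the table of closed-form values
lemma pv_fold_eq (n : Nat) :
    (PySem.List.pyRange 0 (n : Int) 1).foldl
      (fun optimos i =>
        if i = 0 then optimos ++ [0]
        else if PySem.Int.mod i 2 = 0 then
          optimos ++ [min (PySem.List.pyGetD optimos (i - 1) 0 + 1)
                          (PySem.List.pyGetD optimos (PySem.Int.truncdiv i 2) 0 + 1)]
        else optimos ++ [PySem.List.pyGetD optimos (i - 1) 0 + 1])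
      []
    = (List.range n).map pvF := by
  induction n with
  | zero => simp [PySem.List.pyRange_one_eq_nil]
  | succ n ih =>
    rw [show ((n + 1 : Nat) : Int) = (n : Int) + 1 by push_cast; ring,
        PySem.List.pyRange_one_succ_right (by positivity), List.foldl_append, ih]
    simpa using pv_step_eval n

-- B's map over range(0, n) is the same table
lemma pv_map_eq (n : Nat) :
    (PySem.List.pyRange 0 (n : Int) 1).map
      (fun i => if i = 0 then 0
                else (PySem.Int.bitLength i : Int) - 1 + (PySem.Int.bitCount i : Int))
    = (List.range n).map pvF := by
  rw [PySem.List.pyRange_one]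
  simp only [Int.sub_zero, Int.toNat_natCast, List.map_map]
  apply List.map_congr_left
  intro j _
  simp [pvF]

-- ===== VERDICT (by name: the statement is the Claim_ definition above) =====
theorem obtener_optimos_spec : Claim_equal_obtener_optimos := by
  intro k _
  unfold Spec_obtener_optimos obtener_optimos obtener_optimos_alt
  rcases le_or_gt (k + 1) 0 with h | h
  · rw [PySem.List.pyRange_one_eq_nil h]
    simp
  · have hk : k + 1 = (((k + 1).toNat : Nat) : Int) := by omega
    rw [hk, pv_fold_eq, pv_map_eq]
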